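-- pv_equiv track=rewrite | github.com/atgeirr/Damaris | examples/python/test_dask_blocks.py | getSeparator2
-- ===== SOURCE A (Python) =====
-- def getSeparator2(p0, p1, dim, instr, first_elem):
--     resstr = ''
--     if p1[dim] > p0[dim]:
--         if first_elem == False:
--             resstr = instr + ","
--         else:
--             first_elem = False
--             resstr = instr + ","
--     elif p1[dim] <= p0[dim]:
--         if dim > 0:
--             instr += "]\n"
--             first_elem = False
--             resstr2, first_elem = getSeparator2(p0, p1, dim-1, instr, first_elem)
--             first_elem = True
--             resstr += resstr2 + "["
--     return resstr, first_elem
-- ===== SOURCE B (Python) =====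
-- def getSeparator2(p0, p1, dim, instr, first_elem):
--     d = dim
--     count = 0
--     while p1[d] <= p0[d] and d > 0:
--         d -= 1
--         count += 1
--     if p1[d] > p0[d]:
--         return instr + "]\n" * count + "," + "[" * count, count != 0
--     if count > 0:
--         return "[" * count, True
--     return "", first_elem
-- ===== Notes on version B (the rewrite author's own statement) =====
-- stated objective: simpler
-- what changed: Replaces A's single-path recursion (which threads instr/first_elem through nested calls and appends one bracket per unwinding step) by a single explicit loop that counts descents and then builds the whole separator string in closed form with string repetition.
import Mathlib
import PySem

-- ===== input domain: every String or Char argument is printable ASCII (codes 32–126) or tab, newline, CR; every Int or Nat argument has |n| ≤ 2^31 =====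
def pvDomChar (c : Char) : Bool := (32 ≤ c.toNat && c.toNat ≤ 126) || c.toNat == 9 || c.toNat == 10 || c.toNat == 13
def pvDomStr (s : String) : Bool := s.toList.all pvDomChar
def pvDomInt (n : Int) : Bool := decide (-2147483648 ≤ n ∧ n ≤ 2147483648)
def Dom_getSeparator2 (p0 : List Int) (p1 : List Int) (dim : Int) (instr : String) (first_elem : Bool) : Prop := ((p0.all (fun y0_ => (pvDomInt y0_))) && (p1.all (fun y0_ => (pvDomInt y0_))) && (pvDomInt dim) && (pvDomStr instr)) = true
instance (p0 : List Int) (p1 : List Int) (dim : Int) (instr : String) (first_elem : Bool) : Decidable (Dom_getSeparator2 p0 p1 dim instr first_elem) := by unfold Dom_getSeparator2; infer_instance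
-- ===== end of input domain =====

-- B replaces A's single-path recursion by one explicit descent-counting loop that
-- builds the separator string in closed form (objective: simpler).

-- ===== PORT A =====
-- literal transliteration of A's recursion; the `none` branch is an IndexError,
-- excluded by Pre_getSeparator2
def getSeparator2 (p0 : List Int) (p1 : List Int) (dim : Int) (instr : String) (first_elem : Bool) : String × Bool :=
  match PySem.List.pyGet? p1 dim, PySem.List.pyGet? p0 dim with
  | some a, some b =>
    if a > b then
      (instr ++ ",", false)
    else
      -- a ≤ b
      if dim > 0 then
        let instr' := instr ++ "]\n"
        let r2 := getSeparator2 p0 p1 (dim - 1) instr' false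
        (r2.1 ++ "[", true)
      else
        ("", first_elem)
  | _, _ => ("", first_elem)
termination_by dim.toNat
decreasing_by omega

-- ===== PORT B =====
-- s * n (Python string repetition)
def pvRep (s : String) : Nat → String
  | 0 => ""
  | n + 1 => s ++ pvRep s n

-- B's while loop: descend while p1[d] <= p0[d] and d > 0, counting steps;
-- `none` = IndexError (excluded by Pre_getSeparator2)
def pvDescend (p0 : List Int) (p1 : List Int) (d : Int) (count : Nat) : Option (Int × Nat) :=
  match PySem.List.pyGet? p1 d with
  | none => none
  | some a =>
    match PySem.List.pyGet? p0 d with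
    | none => none
    | some b =>
      if a ≤ b ∧ d > 0 then pvDescend p0 p1 (d - 1) (count + 1) else some (d, count)
termination_by d.toNat
decreasing_by omega

def getSeparator2_alt (p0 : List Int) (p1 : List Int) (dim : Int) (instr : String) (first_elem : Bool) : String × Bool :=
  match pvDescend p0 p1 dim 0 with
  | none => ("", first_elem)
  | some (d, count) =>
    match PySem.List.pyGet? p1 d with
    | none => ("", first_elem)
    | some a =>
      match PySem.List.pyGet? p0 d with
      | none => ("", first_elem)
      | some b =>
        if a > b then
          (instr ++ pvRep "]\n" count ++ "," ++ pvRep "[" count, decide (count ≠ 0))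
        else if count > 0 then
          (pvRep "[" count, true)
        else
          ("", first_elem)

-- ===== PRECONDITION & SPEC =====
-- exactly the inputs where A's index accesses all succeed (Python negative
-- indices wrap; recursion only descends while dim stays positive)
def Pre_getSeparator2 (p0 : List Int) (p1 : List Int) (dim : Int) (instr : String) (first_elem : Bool) : Prop :=
  if 0 ≤ dim then dim < (p0.length : Int) ∧ dim < (p1.length : Int)
  else -(p0.length : Int) ≤ dim ∧ -(p1.length : Int) ≤ dim
instance (p0 : List Int) (p1 : List Int) (dim : Int) (instr : String) (first_elem : Bool) : Decidable (Pre_getSeparator2 p0 p1 dim instr first_elem) := by unfold Pre_getSeparator2; infer_instance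

def pvWitness_getSeparator2 : List Int × List Int × Int × String × Bool := ([3, 1], [2, 5], 1, "x", false)

def Spec_getSeparator2 (p0 : List Int) (p1 : List Int) (dim : Int) (instr : String) (first_elem : Bool) (out : String × Bool) : Prop := out = getSeparator2_alt p0 p1 dim instr first_elem
instance (p0 : List Int) (p1 : List Int) (dim : Int) (instr : String) (first_elem : Bool) (out : String × Bool) : Decidable (Spec_getSeparator2 p0 p1 dim instr first_elem out) := by unfold Spec_getSeparator2; infer_instance

-- ===== CLAIM (what is proved, stated in full; the proofs are below) =====
def Claim_equal_getSeparator2 : Prop := ∀ (p0 : List Int) (p1 : List Int) (dim : Int) (instr : String) (first_elem : Bool), Dom_getSeparator2 p0 p1 dim instr first_elem → Pre_getSeparator2 p0 p1 dim instr first_elem → Spec_getSeparator2 p0 p1 dim instr first_elem (getSeparator2 p0 p1 dim instr first_elem)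

-- ===== LEMMAS AND PROOFS =====

-- valid Python index ⇒ the access succeeds, and conversely
theorem pyGet?_isSome_of_range {a : Type} (xs : List a) (i : Int)
    (h1 : -(xs.length : Int) ≤ i) (h2 : i < (xs.length : Int)) :
    (PySem.List.pyGet? xs i).isSome := by
  simp [PySem.List.pyGet?, PySem.List.pyIdx?]
  split_ifs <;> simp <;> omega

theorem range_of_pyGet?_eq_some {a : Type} (xs : List a) (i : Int) (x : a)
    (h : PySem.List.pyGet? xs i = some x) :
    -(xs.length : Int) ≤ i ∧ i < (xs.length : Int) := by
  by_contra hc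
  have hn : PySem.List.pyGet? xs i = none :=
    (PySem.List.pyGet?_eq_none_iff xs i).mpr (by simp [PySem.Raise.InRange]; omega)
  simp [h] at hn

theorem pvRep_snoc (s : String) (n : Nat) : pvRep s n ++ s = s ++ pvRep s n := by
  induction n with
  | zero => simp [pvRep]
  | succ n ih => simp only [pvRep, String.append_assoc, ih]

-- the accumulator of pvDescend only shifts the returned count
theorem pvDescend_succ (p0 p1 : List Int) (d : Int) (k : Nat) :
    pvDescend p0 p1 d (k + 1) = (pvDescend p0 p1 d k).map (fun x => (x.1, x.2 + 1)) := by
  induction d, k using pvDescend.induct p0 p1 with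
  | case1 d k h1 =>
    conv_lhs => rw [pvDescend]
    conv_rhs => rw [pvDescend]
    simp [h1]
  | case2 d k a h1 h0 =>
    conv_lhs => rw [pvDescend]
    conv_rhs => rw [pvDescend]
    simp [h1, h0]
  | case3 d k a h1 b h0 hc ih =>
    conv_lhs => rw [pvDescend]
    conv_rhs => rw [pvDescend]
    simp only [h1, h0, if_pos hc]
    exact ih
  | case4 d k a h1 b h0 hc =>
    conv_lhs => rw [pvDescend]
    conv_rhs => rw [pvDescend]
    simp [h1, h0, hc]

theorem pvDescend_shift (p0 p1 : List Int) (d : Int) (k : Nat) :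
    pvDescend p0 p1 d k = (pvDescend p0 p1 d 0).map (fun x => (x.1, x.2 + k)) := by
  induction k with
  | zero => cases pvDescend p0 p1 d 0 <;> simp
  | succ k ih =>
    rw [pvDescend_succ, ih]
    cases pvDescend p0 p1 d 0 <;> simp <;> omega

-- the descent loop never hits an IndexError once the first access succeeds
theorem pvDescend_isSome (p0 p1 : List Int) (d : Int) (k : Nat)
    (hs1 : (PySem.List.pyGet? p1 d).isSome) (hs0 : (PySem.List.pyGet? p0 d).isSome) :
    pvDescend p0 p1 d k ≠ none := by
  induction d, k using pvDescend.induct p0 p1 with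
  | case1 d k h1 => rw [h1] at hs1; simp at hs1
  | case2 d k a h1 h0 => rw [h0] at hs0; simp at hs0
  | case3 d k a h1 b h0 hc ih =>
    rw [pvDescend]; simp only [h1, h0, if_pos hc]
    obtain ⟨l1, r1⟩ := range_of_pyGet?_eq_some p1 d a h1
    obtain ⟨l0, r0⟩ := range_of_pyGet?_eq_some p0 d b h0
    exact ih (pyGet?_isSome_of_range p1 (d - 1) (by omega) (by omega))
      (pyGet?_isSome_of_range p0 (d - 1) (by omega) (by omega))
  | case4 d k a h1 b h0 hc => rw [pvDescend]; simp [h1, h0, hc]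

-- when the loop stops at (d', c), the final accesses at d' succeed
theorem pvDescend_stop (p0 p1 : List Int) (d : Int) (k : Nat) (d' : Int) (c : Nat)
    (h : pvDescend p0 p1 d k = some (d', c)) :
    (PySem.List.pyGet? p1 d').isSome ∧ (PySem.List.pyGet? p0 d').isSome := by
  induction d, k using pvDescend.induct p0 p1 with
  | case1 d k h1 => rw [pvDescend] at h; simp [h1] at h
  | case2 d k a h1 h0 => rw [pvDescend] at h; simp [h1, h0] at h
  | case3 d k a h1 b h0 hc ih =>
    rw [pvDescend] at h; simp only [h1, h0, if_pos hc] at h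
    exact ih h
  | case4 d k a h1 b h0 hc =>
    rw [pvDescend] at h; simp only [h1, h0, if_neg hc, Option.some.injEq] at h
    have hd : d' = d := by cases h; rfl
    subst hd; simp [h1, h0]

-- main correspondence, by the same induction as A's recursion
theorem main_lemma (p0 p1 : List Int) (dim : Int) (instr : String) (first_elem : Bool)
    (hpre : Pre_getSeparator2 p0 p1 dim instr first_elem) :
    getSeparator2 p0 p1 dim instr first_elem = getSeparator2_alt p0 p1 dim instr first_elem := by
  have hget1 : (PySem.List.pyGet? p1 dim).isSome := by
    refine pyGet?_isSome_of_range p1 dim ?_ ?_ <;>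
      (unfold Pre_getSeparator2 at hpre; split at hpre <;> omega)
  have hget0 : (PySem.List.pyGet? p0 dim).isSome := by
    refine pyGet?_isSome_of_range p0 dim ?_ ?_ <;>
      (unfold Pre_getSeparator2 at hpre; split at hpre <;> omega)
  rcases h1 : PySem.List.pyGet? p1 dim with _ | a
  · rw [h1] at hget1; simp at hget1
  rcases h0 : PySem.List.pyGet? p0 dim with _ | b
  · rw [h0] at hget0; simp at hget0
  rw [getSeparator2]
  unfold getSeparator2_alt
  rw [pvDescend]
  simp only [h1, h0]
  by_cases hab : a > b
  · -- A stops immediately: count = 0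
    have hnc : ¬ (a ≤ b ∧ dim > 0) := by omega
    simp only [if_pos hab, if_neg hnc]
    simp [h1, h0, if_pos hab, pvRep]
  · have hle : a ≤ b := by omega
    by_cases hd : dim > 0
    · -- recursive case
      have hnab : ¬ a > b := hab
      simp only [if_neg hnab, if_pos hd, if_pos (And.intro hle hd)]
      have hpre' : Pre_getSeparator2 p0 p1 (dim - 1) (instr ++ "]\n") false := by
        unfold Pre_getSeparator2 at hpre ⊢
        split at hpre <;> split <;> omega
      rw [main_lemma p0 p1 (dim - 1) (instr ++ "]\n") false hpre']
      unfold getSeparator2_alt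
      rw [pvDescend_shift p0 p1 (dim - 1) 1]
      have hg1' : (PySem.List.pyGet? p1 (dim - 1)).isSome := by
        refine pyGet?_isSome_of_range p1 (dim - 1) ?_ ?_ <;>
          (unfold Pre_getSeparator2 at hpre'; split at hpre' <;> omega)
      have hg0' : (PySem.List.pyGet? p0 (dim - 1)).isSome := by
        refine pyGet?_isSome_of_range p0 (dim - 1) ?_ ?_ <;>
          (unfold Pre_getSeparator2 at hpre'; split at hpre' <;> omega)
      -- the descent from dim-1 terminates with a valid pair (proved below)
      rcases hdes : pvDescend p0 p1 (dim - 1) 0 with _ | ⟨d', c⟩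
      · exact absurd hdes (pvDescend_isSome p0 p1 (dim - 1) 0 hg1' hg0')
      simp only [Option.map_some]
      rcases hfin : PySem.List.pyGet? p1 d' with _ | a'
      · exact absurd hfin (Option.isSome_iff_ne_none.mp (pvDescend_stop p0 p1 (dim - 1) 0 d' c hdes).1)
      rcases hfin0 : PySem.List.pyGet? p0 d' with _ | b'
      · exact absurd hfin0 (Option.isSome_iff_ne_none.mp (pvDescend_stop p0 p1 (dim - 1) 0 d' c hdes).2)
      by_cases hab' : a' > b'
      · simp only [if_pos hab']
        simp [pvRep, String.append_assoc]
        rw [pvRep_snoc]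
      · simp only [if_neg hab']
        by_cases hc : c > 0
        · simp only [if_pos hc, if_pos (by omega : c + 1 > 0), pvRep]
          rw [pvRep_snoc]
        · have hc0 : c = 0 := by omega
          subst hc0
          simp [pvRep]
    · -- dim ≤ 0: both return ("", first_elem)
      have hnc : ¬ (a ≤ b ∧ dim > 0) := by intro h; exact hd h.2
      simp [if_neg hab, if_neg hd, if_neg hnc, h1, h0]
termination_by dim.toNat
decreasing_by omega

-- ===== VERDICT (by name: the statement is the Claim_ definition above) =====
theorem getSeparator2_spec : Claim_equal_getSeparator2 := by
  intro p0 p1 dim instr first_elem _ hpre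
  unfold Spec_getSeparator2
  exact main_lemma p0 p1 dim instr first_elem hpre
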